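-- pv_equiv track=rewrite | github.com/layer6ai-labs/hitl-conformal-prediction | dataset_utils.py | filter_above_threshold_entity_span
-- ===== SOURCE A (Python) =====
-- from itertools import chain, groupby
--
-- def filter_above_threshold_entity_span(example):
--     fine_ner_tags = example["fine_ner_tags"]
--     if not fine_ner_tags:
--         return False
--
--     tag_freq_group_counter = groupby(fine_ner_tags)
--     max_freq = max(
--         [len(list(value)) for key, value in tag_freq_group_counter if key != 0],
--         default=0,
--     )  # ignore 0 as they dont represent any category
--     return max_freq <= 8
-- ===== SOURCE B (Python) =====
-- def filter_above_threshold_entity_span(example):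
--     fine_ner_tags = example["fine_ner_tags"]
--     if not fine_ner_tags:
--         return False
--     # A run longer than 8 exists iff some length-9 window is constant and non-zero.
--     head9 = [fine_ner_tags[i:i + 9] for i in range(len(fine_ner_tags) - 8)]
--     return all(w[0] == 0 or w != [w[0]] * 9 for w in head9)
-- ===== Notes on version B (the rewrite author's own statement) =====
-- stated objective: alternative
-- what changed: Replaces groupby run-length maximisation with a sliding-window existence test: the answer is True iff no length-9 window of the tag list is a constant non-zero block, so no group lengths or run counters are ever computed.
import Mathlib
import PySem

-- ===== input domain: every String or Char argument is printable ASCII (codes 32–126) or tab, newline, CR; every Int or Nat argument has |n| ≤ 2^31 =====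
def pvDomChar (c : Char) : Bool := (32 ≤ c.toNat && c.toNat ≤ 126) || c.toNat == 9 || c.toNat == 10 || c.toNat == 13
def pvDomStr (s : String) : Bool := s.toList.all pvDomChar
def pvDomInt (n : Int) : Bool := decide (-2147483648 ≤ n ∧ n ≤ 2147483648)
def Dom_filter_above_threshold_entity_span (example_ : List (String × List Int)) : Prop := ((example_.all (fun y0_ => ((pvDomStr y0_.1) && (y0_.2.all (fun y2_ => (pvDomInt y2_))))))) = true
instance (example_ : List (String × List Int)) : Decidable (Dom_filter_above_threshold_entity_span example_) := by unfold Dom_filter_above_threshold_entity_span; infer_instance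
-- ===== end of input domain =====

-- B replaces groupby + max of group lengths by a sliding-window test ("no length-9 window is a constant non-zero block"): an alternative algorithm, no run lengths computed.


-- ===== PORT A =====
-- itertools.groupby over the tag list: carries the current group's key and length forward.
def pvGroups (p : Int) (c : Nat) : List Int → List (Int × Nat)
  | [] => [(p, c)]
  | x :: rest => if x = p then pvGroups p (c + 1) rest else (p, c) :: pvGroups x 1 rest

def filter_above_threshold_entity_span (example_ : List (String × List Int)) : Bool :=
  let fine_ner_tags := ((PySem.Dict.mk example_).get? "fine_ner_tags").getD []
  match fine_ner_tags with
  | [] => false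
  | x :: rest =>
    -- [len(list(value)) for key, value in groupby(...) if key != 0], then max(…, default=0)
    let lens := (pvGroups x 1 rest).filterMap (fun g => if g.1 ≠ 0 then some g.2 else none)
    decide (lens.foldl max 0 ≤ 8)

-- ===== PORT B =====
-- sliding windows tags[i:i+9]; w[0] is headI (every window has length 9, so this is exact)
def filter_above_threshold_entity_span_alt (example_ : List (String × List Int)) : Bool :=
  let fine_ner_tags := ((PySem.Dict.mk example_).get? "fine_ner_tags").getD []
  if fine_ner_tags.isEmpty then false
  else
    let head9 := (PySem.List.pyRange 0 ((fine_ner_tags.length : Int) - 8) 1).map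
      (fun i => PySem.List.slice fine_ner_tags (some i) (some (i + 9)))
    head9.all (fun w => decide (w.headI = 0) || decide (w ≠ List.replicate 9 w.headI))

-- ===== PRECONDITION & SPEC =====
-- Pre_: the dict must contain the key "fine_ner_tags" (Python A raises KeyError otherwise).
def Pre_filter_above_threshold_entity_span (example_ : List (String × List Int)) : Prop :=
  ((PySem.Dict.mk example_).get? "fine_ner_tags").isSome = true
instance (example_ : List (String × List Int)) : Decidable (Pre_filter_above_threshold_entity_span example_) := by unfold Pre_filter_above_threshold_entity_span; infer_instance
def pvWitness_filter_above_threshold_entity_span : (List (String × List Int)) := [("fine_ner_tags", [0, 1, 1, 0])]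
def Spec_filter_above_threshold_entity_span (example_ : List (String × List Int)) (out : Bool) : Prop := out = filter_above_threshold_entity_span_alt example_
instance (example_ : List (String × List Int)) (out : Bool) : Decidable (Spec_filter_above_threshold_entity_span example_ out) := by unfold Spec_filter_above_threshold_entity_span; infer_instance

-- ===== CLAIM (what is proved, stated in full; the proofs are below) =====
def Claim_equal_filter_above_threshold_entity_span : Prop := ∀ (example_ : List (String × List Int)), Dom_filter_above_threshold_entity_span example_ → Pre_filter_above_threshold_entity_span example_ → Spec_filter_above_threshold_entity_span example_ (filter_above_threshold_entity_span example_)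

-- ===== LEMMAS AND PROOFS =====

-- "some length-9 window (suffix prefix) is constant non-zero": the common characterisation
def pvWinBad : List Int → Bool
  | [] => false
  | x :: rest => (decide (x ≠ 0) && decide ((x :: rest).take 9 = List.replicate 9 x)) || pvWinBad rest

-- length of the leading run of p
def pvLead (p : Int) : List Int → Nat
  | [] => 0
  | x :: r => if x = p then pvLead p r + 1 else 0

-- "some group (including the carried one p^c) is non-zero of length ≥ 9", in pvGroups' recursion shape
def pvExt (p : Int) (c : Nat) : List Int → Bool
  | [] => decide (p ≠ 0 ∧ 9 ≤ c)
  | x :: rest => if x = p then pvExt p (c + 1) rest else (decide (p ≠ 0 ∧ 9 ≤ c) || pvExt x 1 rest)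

def pvMaxNZ (gs : List (Int × Nat)) : Nat :=
  (gs.filterMap (fun g => if g.1 ≠ 0 then some g.2 else none)).foldl max 0

theorem pvFoldl_max_init (l : List Nat) (a : Nat) : l.foldl max a = max a (l.foldl max 0) := by
  induction l generalizing a with
  | nil => simp
  | cons x xs ih =>
    simp only [List.foldl_cons]
    rw [ih (max a x), ih (max 0 x)]
    omega

theorem pvMaxNZ_cons (p : Int) (c : Nat) (gs : List (Int × Nat)) :
    pvMaxNZ ((p, c) :: gs) = if p ≠ 0 then max c (pvMaxNZ gs) else pvMaxNZ gs := by
  simp only [pvMaxNZ, List.filterMap_cons]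
  split_ifs with h
  · simp only [List.foldl_cons]; rw [pvFoldl_max_init]; omega
  · rfl

theorem pvA1 (xs : List Int) (p : Int) (c : Nat) :
    (pvMaxNZ (pvGroups p c xs) ≤ 8) ↔ pvExt p c xs = false := by
  induction xs generalizing p c with
  | nil =>
    simp only [pvGroups, pvExt, pvMaxNZ_cons, decide_eq_false_iff_not]
    have h0 : pvMaxNZ [] = 0 := rfl
    rw [h0]
    split_ifs with h
    · simp [h]; omega
    · simp [h]
  | cons x rest ih =>
    simp only [pvGroups, pvExt]
    by_cases hx : x = p
    · subst hx; rw [if_pos rfl, if_pos rfl, ih]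
    · rw [if_neg hx, if_neg hx, pvMaxNZ_cons, Bool.or_eq_false_iff, ← ih,
        decide_eq_false_iff_not]
      split_ifs with h
      · simp [h]; omega
      · simp [h]

-- take n = replicate n x  ↔  n ≤ leading run of x
theorem pvTakeRep (n : Nat) (l : List Int) (x : Int) :
    l.take n = List.replicate n x ↔ n ≤ pvLead x l := by
  induction n generalizing l with
  | zero => simp
  | succ n ih =>
    cases l with
    | nil => simp [pvLead, List.replicate_succ]
    | cons y r =>
      simp only [List.take_succ_cons, List.replicate_succ, List.cons_eq_cons, pvLead]
      by_cases hy : y = x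
      · subst hy; rw [if_pos rfl, ih]; simp
      · rw [if_neg hy]; simp [hy]

-- Prop characterisation of pvExt: some group (incl. the carried run p^c) is non-zero of length ≥ 9
theorem pvE (xs : List Int) (p : Int) (c : Nat) (hc : 1 ≤ c) :
    pvExt p c xs = true ↔ ((p ≠ 0 ∧ 9 ≤ c + pvLead p xs) ∨ pvWinBad xs = true) := by
  induction xs generalizing p c with
  | nil => simp [pvExt, pvLead, pvWinBad]
  | cons x rest ih =>
    by_cases hx : x = p
    · subst hx
      simp only [pvExt, pvWinBad, pvLead, if_true]
      have ht := pvTakeRep 9 (x :: rest) x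
      simp only [pvLead, if_true] at ht
      simp only [Bool.or_eq_true, Bool.and_eq_true, decide_eq_true_eq, ih x (c + 1) (by omega : 1 ≤ c + 1)]
      constructor
      · rintro (⟨h1, h2⟩ | h)
        · exact Or.inl ⟨h1, by omega⟩
        · exact Or.inr (Or.inr h)
      · rintro (⟨h1, h2⟩ | ⟨h1, h2⟩ | h)
        · exact Or.inl ⟨h1, by omega⟩
        · exact Or.inl ⟨h1, by have := ht.mp h2; omega⟩
        · exact Or.inr h
    · simp only [pvExt, pvWinBad, pvLead, if_neg hx]
      have ht := pvTakeRep 9 (x :: rest) x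
      simp only [pvLead, if_true] at ht
      simp only [Bool.or_eq_true, Bool.and_eq_true, decide_eq_true_eq]
      rw [ih x 1 (by omega)]
      constructor
      · rintro (h | ⟨h1, h2⟩ | h)
        · exact Or.inl ⟨h.1, by omega⟩
        · exact Or.inr (Or.inl ⟨h1, ht.mpr (by omega)⟩)
        · exact Or.inr (Or.inr h)
      · rintro (⟨h1, h2⟩ | ⟨h1, h2⟩ | h)
        · exact Or.inl ⟨h1, by omega⟩
        · exact Or.inr (Or.inl ⟨h1, by have := ht.mp h2; omega⟩)
        · exact Or.inr (Or.inr h)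

-- pvExt with a fresh head run of length 1 is exactly pvWinBad of the whole list
theorem pvExt_eq_winBad (x : Int) (rest : List Int) :
    pvExt x 1 rest = pvWinBad (x :: rest) := by
  apply Bool.eq_iff_iff.mpr
  rw [pvE rest x 1 (by omega)]
  have ht := pvTakeRep 9 (x :: rest) x
  simp only [pvLead, if_true] at ht
  simp only [pvWinBad, Bool.or_eq_true, Bool.and_eq_true, decide_eq_true_eq]
  constructor
  · rintro (⟨h1, h2⟩ | h)
    · exact Or.inl ⟨h1, ht.mpr (by omega)⟩
    · exact Or.inr h
  · rintro (⟨h1, h2⟩ | h)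
    · exact Or.inl ⟨h1, by have := ht.mp h2; omega⟩
    · exact Or.inr h

-- B's window predicate at offset k
def pvBadAt (l : List Int) (k : Nat) : Bool :=
  decide (((l.drop k).take 9).headI ≠ 0) && decide ((l.drop k).take 9 = List.replicate 9 ((l.drop k).take 9).headI)

theorem pvHeadI_take9 (x : Int) (rest : List Int) : ((x :: rest).take 9).headI = x := by
  rw [show (9 : Nat) = 8 + 1 from rfl, List.take_succ_cons]; rfl

theorem pvWinBad_eq_any_range (l : List Int) :
    pvWinBad l = (List.range l.length).any (pvBadAt l) := by
  induction l with
  | nil => simp [pvWinBad]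
  | cons x rest ih =>
    have h0 : pvBadAt (x :: rest) 0 = (decide (x ≠ 0) && decide ((x :: rest).take 9 = List.replicate 9 x)) := by
      simp only [pvBadAt, List.drop_zero, pvHeadI_take9]
    have hmap : ((List.range rest.length).map Nat.succ).any (pvBadAt (x :: rest)) =
        (List.range rest.length).any (pvBadAt rest) := by
      rw [List.any_map]
      apply List.any_congr rfl
      intro k
      simp only [Function.comp_apply, pvBadAt, Nat.succ_eq_add_one, List.drop_succ_cons]
      rfl
    simp only [pvWinBad, List.length_cons, List.range_succ_eq_map, List.any_cons, hmap, h0, ih]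

theorem pvAny_range_shrink (f : Nat → Bool) (m n : Nat) (hmn : m ≤ n)
    (h : ∀ k, m ≤ k → k < n → f k = false) :
    (List.range n).any f = (List.range m).any f := by
  have hsplit : n = m + (n - m) := by omega
  rw [hsplit, List.range_add, List.any_append]
  have h2 : ((List.range (n - m)).map (m + ·)).any f = false := by
    rw [List.any_eq_false]
    intro a ha
    obtain ⟨k, hk, rfl⟩ := List.mem_map.mp ha
    have hk' := List.mem_range.mp hk
    simp [h (m + k) (by omega) (by omega)]
  rw [h2, Bool.or_false]

-- the two per-list computations agree on a non-empty tag list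
theorem pvAB (x : Int) (rest : List Int) :
    decide ((((pvGroups x 1 rest).filterMap fun g => if g.1 ≠ 0 then some g.2 else none).foldl max 0) ≤ 8)
      = ((PySem.List.pyRange 0 (((x :: rest).length : Int) - 8) 1).map fun i =>
          PySem.List.slice (x :: rest) (some i) (some (i + 9))).all fun w =>
          decide (w.headI = 0) || decide (w ≠ List.replicate 9 w.headI) := by
  have hA : decide (pvMaxNZ (pvGroups x 1 rest) ≤ 8) = !pvWinBad (x :: rest) := by
    have h1 := pvA1 rest x 1
    rw [pvExt_eq_winBad] at h1
    cases hw : pvWinBad (x :: rest) with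
    | false => simpa using h1.mpr hw
    | true =>
      simp only [Bool.not_true, decide_eq_false_iff_not]
      intro hle
      rw [h1.mp hle] at hw
      exact Bool.false_ne_true hw
  rw [show (((pvGroups x 1 rest).filterMap fun g => if g.1 ≠ 0 then some g.2 else none).foldl max 0)
        = pvMaxNZ (pvGroups x 1 rest) from rfl, hA]
  rw [PySem.List.pyRange_one]
  have hlen : ((((x :: rest).length : Int)) - 8 - 0).toNat = (x :: rest).length - 8 := by omega
  rw [hlen, List.all_map, List.all_map]
  have hside : ∀ k, (x :: rest).length - 8 ≤ k → k < (x :: rest).length → pvBadAt (x :: rest) k = false := by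
    intro k hk1 hk2
    simp only [pvBadAt, Bool.and_eq_false_iff]
    right
    rw [decide_eq_false_iff_not]
    intro heq
    have hl := congrArg List.length heq
    simp only [List.length_take, List.length_drop, List.length_replicate] at hl
    omega
  rw [pvWinBad_eq_any_range,
    pvAny_range_shrink (pvBadAt (x :: rest)) ((x :: rest).length - 8) (x :: rest).length (by omega) hside,
    List.not_any_eq_all_not]
  apply List.all_congr rfl
  intro k
  have hwin : PySem.List.slice (x :: rest) (some ((0 : Int) + (k : Int))) (some ((0 : Int) + (k : Int) + 9)) =
      ((x :: rest).drop k).take 9 := by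
    have := PySem.List.slice_natCast_add (xs := x :: rest) (j := k) (n := 9)
    simpa using this
  simp only [Function.comp_apply, hwin]
  rw [show pvBadAt (x :: rest) k = (decide ((((x :: rest).drop k).take 9).headI ≠ 0) &&
      decide (((x :: rest).drop k).take 9 = List.replicate 9 (((x :: rest).drop k).take 9).headI)) from rfl]
  apply Bool.eq_iff_iff.mpr
  simp only [Bool.or_eq_true, Bool.not_eq_true', Bool.and_eq_false_iff, decide_eq_true_eq,
    decide_eq_false_iff_not, not_not]

-- ===== VERDICT (by name: the statement is the Claim_ definition above) =====
theorem filter_above_threshold_entity_span_spec : Claim_equal_filter_above_threshold_entity_span := by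
  intro example_ _ _
  unfold Spec_filter_above_threshold_entity_span
  unfold filter_above_threshold_entity_span filter_above_threshold_entity_span_alt
  cases h : ((PySem.Dict.mk example_).get? "fine_ner_tags").getD [] with
  | nil => rfl
  | cons x rest => exact pvAB x rest
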